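-- pv_equiv track=rewrite | github.com/wooya0123/Algorithm_sol | BOJ/Gold4/2448/sol.py | counting_star
-- ===== SOURCE A (Python) =====
-- def counting_star(n):
--     if n == 3:
--         return ['  *  ', ' * * ', '*****']  # n == 3일 때 모양
--
--     star = counting_star(n//2)
--     res = []
--
--     for s in star:
--         res.append(' '*(n//2) + s + ' '*(n//2))
--     for s in star:
--         res.append(s + ' ' + s)
--
--     return res
-- ===== SOURCE B (Python) =====
-- def counting_star(n):
--     # Bottom-up iterative doubling instead of A's top-down recursion:
--     # record the halving chain of sizes, then build the pattern from the
--     # 3-row base upward, smallest size first.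
--     sizes = []
--     m = n
--     while m > 3:
--         sizes.append(m)
--         m //= 2
--     if m != 3:
--         raise ValueError('n must be 3 * 2**k')
--     stars = ['  *  ', ' * * ', '*****']
--     for m in reversed(sizes):
--         pad = ' ' * (m // 2)
--         stars = [pad + s + pad for s in stars] + [s + ' ' + s for s in stars]
--     return stars
-- ===== Notes on version B (the rewrite author's own statement) =====
-- stated objective: alternative
-- what changed: Replaced A's top-down recursion (recurse on n//2, then wrap) by an iterative bottom-up doubling: collect the halving chain of sizes, validate that it ends at 3, then fold over it from the 3-row base upward.
import Mathlib
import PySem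

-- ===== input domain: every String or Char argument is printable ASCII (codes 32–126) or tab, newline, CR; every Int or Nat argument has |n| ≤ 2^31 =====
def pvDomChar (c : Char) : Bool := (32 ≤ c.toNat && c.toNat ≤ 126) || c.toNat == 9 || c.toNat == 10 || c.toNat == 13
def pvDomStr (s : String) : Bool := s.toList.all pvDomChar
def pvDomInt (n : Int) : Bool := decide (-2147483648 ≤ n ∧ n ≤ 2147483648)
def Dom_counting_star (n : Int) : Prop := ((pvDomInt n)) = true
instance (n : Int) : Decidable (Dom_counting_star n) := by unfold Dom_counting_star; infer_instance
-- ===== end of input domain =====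

-- B replaces A's top-down recursion by a bottom-up iterative doubling over the halving
-- chain of sizes (validating that the chain ends at 3, where A would recurse forever);
-- outputs are identical wherever A returns (objective: alternative).

-- ' ' * k  (Python string repetition; empty for k ≤ 0, exactly as in Python)
def pySpaces (k : Int) : String := String.ofList (List.replicate k.toNat ' ')

-- ===== PORT A =====
-- A recurses on n//2 with base case n == 3; for inputs whose halving chain misses 3
-- Python recurses forever (RecursionError) — those inputs are outside Pre_ and the
-- `n < 3` branch returns [] only to make the Lean function total.
def counting_star (n : Int) : List String :=
  if n = 3 then ["  *  ", " * * ", "*****"]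
  else if _h : n < 3 then []  -- Python diverges here (outside Pre_)
  else
    let star := counting_star (PySem.Int.floordiv n 2)
    let res : List String := []
    let res := star.foldl (fun res s =>
      res ++ [pySpaces (PySem.Int.floordiv n 2) ++ s ++ pySpaces (PySem.Int.floordiv n 2)]) res
    let res := star.foldl (fun res s => res ++ [s ++ " " ++ s]) res
    res
termination_by n.toNat
decreasing_by
  rw [PySem.Int.floordiv_eq_ediv_of_pos (by omega : (0:Int) < 2)]
  omega

-- ===== PORT B =====
-- the while loop of Source B: collect the halving chain [n, n//2, …] while > 3, and
-- return the final value of m alongside it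
def pvChain (m : Int) : List Int × Int :=
  if _h : 3 < m then
    let r := pvChain (PySem.Int.floordiv m 2)
    (m :: r.1, r.2)
  else ([], m)
termination_by m.toNat
decreasing_by
  rw [PySem.Int.floordiv_eq_ediv_of_pos (by omega : (0:Int) < 2)]
  omega

def counting_star_alt (n : Int) : List String :=
  let c := pvChain n
  if c.2 ≠ 3 then []  -- Python raises ValueError here (outside Pre_)
  else
    c.1.reverse.foldl
      (fun stars m =>
        let pad := pySpaces (PySem.Int.floordiv m 2)
        (stars.map fun s => pad ++ s ++ pad) ++ (stars.map fun s => s ++ " " ++ s))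
      ["  *  ", " * * ", "*****"]

-- ===== PRECONDITION & SPEC =====
-- Pre_: exactly the inputs on which A's recursion reaches the base case 3, i.e. the n
-- with 3·2^k ≤ n < 4·2^k for some k (equivalently k = Nat.log2 (n/3), the closed form
-- below — no size cap); on every other n Python A raises RecursionError (and B ValueError).
def Pre_counting_star (n : Int) : Prop :=
  3 ≤ n ∧ 3 * 2 ^ Nat.log2 (n.toNat / 3) ≤ n ∧ n < 4 * 2 ^ Nat.log2 (n.toNat / 3)
instance (n : Int) : Decidable (Pre_counting_star n) := by unfold Pre_counting_star; infer_instance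
def pvWitness_counting_star : Int := 12

def Spec_counting_star (n : Int) (out : List String) : Prop := out = counting_star_alt n
instance (n : Int) (out : List String) : Decidable (Spec_counting_star n out) := by unfold Spec_counting_star; infer_instance

-- ===== CLAIM (what is proved, stated in full; the proofs are below) =====
def Claim_equal_counting_star : Prop := ∀ (n : Int), Dom_counting_star n → Pre_counting_star n → Spec_counting_star n (counting_star n)

-- ===== LEMMAS AND PROOFS =====

-- one doubling step, shared shape of both programs' loop bodies
def pvStep (m : Int) (stars : List String) : List String :=
  (stars.map fun s => pySpaces (PySem.Int.floordiv m 2) ++ s ++ pySpaces (PySem.Int.floordiv m 2))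
    ++ (stars.map fun s => s ++ " " ++ s)

lemma counting_star_alt_eq_foldr (n : Int) (h : (pvChain n).2 = 3) :
    counting_star_alt n = (pvChain n).1.foldr pvStep ["  *  ", " * * ", "*****"] := by
  unfold counting_star_alt
  simp only [h, ne_eq, not_true_eq_false, if_false, List.foldl_reverse]
  rfl

lemma counting_star_of_gt (n : Int) (h : 3 < n) :
    counting_star n = pvStep n (counting_star (PySem.Int.floordiv n 2)) := by
  rw [counting_star]
  simp only [show n ≠ 3 by omega, show ¬ n < 3 by omega, if_neg, dif_neg, not_false_iff]
  rw [PySem.List.foldl_append_singleton_eq_map, PySem.List.foldl_append_singleton_eq_map]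
  simp [pvStep]

lemma pvChain_of_gt (n : Int) (h : 3 < n) :
    pvChain n = (n :: (pvChain (PySem.Int.floordiv n 2)).1, (pvChain (PySem.Int.floordiv n 2)).2) := by
  rw [pvChain, dif_pos h]

lemma main_lemma : ∀ (k : Nat) (n : Int), 3 * 2 ^ k ≤ n → n < 4 * 2 ^ k →
    counting_star n = counting_star_alt n ∧ (pvChain n).2 = 3 := by
  intro k
  induction k with
  | zero =>
    intro n h1 h2
    have hn : n = 3 := by norm_num at h1 h2; omega
    subst hn
    have hc : pvChain 3 = ([], 3) := by rw [pvChain]; norm_num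
    refine ⟨?_, by rw [hc]⟩
    rw [counting_star, counting_star_alt_eq_foldr 3 (by rw [hc]), hc]
    norm_num
  | succ k ih =>
    intro n h1 h2
    have hp : (0:Int) < 2 ^ k := by positivity
    have h6 : 6 * 2 ^ k ≤ n := by rw [pow_succ] at h1; linarith
    have h8 : n < 8 * 2 ^ k := by rw [pow_succ] at h2; linarith
    have h3 : (3:Int) < n := by nlinarith
    have hfd : PySem.Int.floordiv n 2 = n / 2 :=
      PySem.Int.floordiv_eq_ediv_of_pos (by omega)
    obtain ⟨ihv, ihc⟩ := ih (PySem.Int.floordiv n 2)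
      (by rw [hfd]; omega) (by rw [hfd]; omega)
    have hc2 : (pvChain n).2 = 3 := by rw [pvChain_of_gt n h3]; exact ihc
    refine ⟨?_, hc2⟩
    rw [counting_star_of_gt n h3, counting_star_alt_eq_foldr n hc2, pvChain_of_gt n h3,
      List.foldr_cons, ← counting_star_alt_eq_foldr _ ihc, ihv]

-- ===== VERDICT (by name: the statement is the Claim_ definition above) =====
theorem counting_star_spec : Claim_equal_counting_star := by
  intro n _ hpre
  obtain ⟨_, h1, h2⟩ := hpre
  unfold Spec_counting_star
  exact (main_lemma (Nat.log2 (n.toNat / 3)) n h1 h2).1
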